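-- pv_equiv track=rewrite | github.com/fw-ai/benchmark | llm_bench/find_qps_for_overall_latency_per_token.py | strip_u_r_t
-- ===== SOURCE A (Python) =====
-- def strip_u_r_t(argv: list[str]) -> list[str]:
--     """Remove -u/--users, -r/--spawn-rate, -t/--run-time and glued forms (-u10)."""
--     out: list[str] = []
--     i = 0
--     two_arg = frozenset({"-u", "--users", "-r", "--spawn-rate", "-t", "--run-time"})
--     eq_keys = frozenset({"-u", "--users", "-r", "--spawn-rate", "-t", "--run-time"})
--     while i < len(argv):
--         s = argv[i]
--         if "=" in s:
--             k = s.split("=", 1)[0]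
--             if k in eq_keys:
--                 i += 1
--                 continue
--         if s in two_arg:
--             i += 2 if i + 1 < len(argv) and not argv[i + 1].startswith("-") else 1
--             continue
--         if s.startswith("-u") and len(s) > 2 and s[2] != "-":
--             i += 1
--             continue
--         if s.startswith("-r") and len(s) > 2 and s[2] != "-":
--             i += 1
--             continue
--         if s.startswith("-t") and len(s) > 2 and s[2] != "-":
--             i += 1
--             continue
--         out.append(s)
--         i += 1
--     return out
-- ===== SOURCE B (Python) =====
-- def strip_u_r_t(argv: list[str]) -> list[str]:
--     """Remove -u/--users, -r/--spawn-rate, -t/--run-time and glued forms (-u10)."""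
--     keys = frozenset({"-u", "--users", "-r", "--spawn-rate", "-t", "--run-time"})
--
--     def dropped(prev: str, s: str) -> bool:
--         # s is a consumed option value iff its immediate predecessor is a bare
--         # key literal and s does not start with '-'; otherwise s is dropped
--         # exactly when it is itself a key in '=' form, bare form, or glued form.
--         return ((prev in keys and not s.startswith("-"))
--                 or ("=" in s and s.split("=", 1)[0] in keys)
--                 or s in keys
--                 or (len(s) > 2 and s[2] != "-"
--                     and (s.startswith("-u") or s.startswith("-r") or s.startswith("-t"))))
--
--     return [s for prev, s in zip([""] + argv, argv) if not dropped(prev, s)]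
-- ===== Notes on version B (the rewrite author's own statement) =====
-- stated objective: alternative
-- what changed: Replaces A's stateful index-lookahead scan (i+=1/i+=2) by a stateless pairwise classification: zip the list with itself shifted by one and keep each element by a pure predicate of (previous element, element), exploiting that an element is a consumed option value exactly when its immediate predecessor is a bare key literal and it does not start with '-'.
import Mathlib
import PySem

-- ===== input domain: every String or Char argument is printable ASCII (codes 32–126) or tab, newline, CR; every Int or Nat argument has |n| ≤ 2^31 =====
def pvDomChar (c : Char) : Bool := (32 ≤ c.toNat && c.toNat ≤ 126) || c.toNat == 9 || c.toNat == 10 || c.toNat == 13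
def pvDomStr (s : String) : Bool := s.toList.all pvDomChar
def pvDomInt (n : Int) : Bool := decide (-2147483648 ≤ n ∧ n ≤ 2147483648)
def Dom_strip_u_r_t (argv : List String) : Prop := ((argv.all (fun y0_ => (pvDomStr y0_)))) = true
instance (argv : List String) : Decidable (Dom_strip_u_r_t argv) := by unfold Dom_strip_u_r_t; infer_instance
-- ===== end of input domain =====

-- B replaces A's stateful index/lookahead scan by a stateless pairwise filter over the
-- list zipped with its one-shifted self (objective: alternative decomposition, same cost).

-- ===== PORT A =====
-- two_arg / eq_keys: frozenset literals of strings; membership 'in' = list membership here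
def pvTwoArg : List String := ["-u", "--users", "-r", "--spawn-rate", "-t", "--run-time"]
def pvEqKeys : List String := ["-u", "--users", "-r", "--spawn-rate", "-t", "--run-time"]

-- the while loop of A, step for step; i is the index, out the accumulator
-- (fuel = argv.length bounds the number of iterations; it only makes the recursion structural)
def stripALoop (argv : List String) : Nat → Nat → List String → List String
  | 0, _, out => out
  | fuel + 1, i, out =>
    if _h : i < argv.length then
      let s := argv[i]
      -- '=' in s and s.split('=',1)[0] in eq_keys  (split('=',1) never yields [], so headD "" is exact)
      if PySem.Str.isIn "=" s && pvEqKeys.contains (((PySem.Str.splitMax? s "=" 1).getD []).headD "") then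
        stripALoop argv fuel (i + 1) out
      else if pvTwoArg.contains s then
        if decide (i + 1 < argv.length) && !(PySem.Str.startswith (argv.getD (i + 1) "") "-") then
          stripALoop argv fuel (i + 2) out
        else
          stripALoop argv fuel (i + 1) out
      else if PySem.Str.startswith s "-u" && decide (2 < PySem.Str.len s) && (PySem.Str.pyGet? s 2 != some '-') then
        stripALoop argv fuel (i + 1) out
      else if PySem.Str.startswith s "-r" && decide (2 < PySem.Str.len s) && (PySem.Str.pyGet? s 2 != some '-') then
        stripALoop argv fuel (i + 1) out
      else if PySem.Str.startswith s "-t" && decide (2 < PySem.Str.len s) && (PySem.Str.pyGet? s 2 != some '-') then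
        stripALoop argv fuel (i + 1) out
      else
        stripALoop argv fuel (i + 1) (out ++ [s])
    else out

def strip_u_r_t (argv : List String) : List String := stripALoop argv argv.length 0 []

-- ===== PORT B =====
def pvKeys : List String := ["-u", "--users", "-r", "--spawn-rate", "-t", "--run-time"]

-- Source B's pure predicate dropped(prev, s)
def pvDrops (prev s : String) : Bool :=
  (pvKeys.contains prev && !PySem.Str.startswith s "-")
  || (PySem.Str.isIn "=" s && pvKeys.contains (((PySem.Str.splitMax? s "=" 1).getD []).headD ""))
  || pvKeys.contains s
  || (decide (2 < PySem.Str.len s) && (PySem.Str.pyGet? s 2 != some '-')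
      && (PySem.Str.startswith s "-u" || PySem.Str.startswith s "-r" || PySem.Str.startswith s "-t"))

-- [s for prev, s in zip([""] + argv, argv) if not dropped(prev, s)]
def strip_u_r_t_alt (argv : List String) : List String :=
  ((("" :: argv).zip argv).filter (fun ps => !pvDrops ps.1 ps.2)).map Prod.snd

-- ===== PRECONDITION & SPEC =====
def Spec_strip_u_r_t (argv : List String) (out : List String) : Prop := out = strip_u_r_t_alt argv
instance (argv : List String) (out : List String) : Decidable (Spec_strip_u_r_t argv out) := by unfold Spec_strip_u_r_t; infer_instance

-- ===== CLAIM (what is proved, stated in full; the proofs are below) =====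
def Claim_equal_strip_u_r_t : Prop := ∀ (argv : List String), Dom_strip_u_r_t argv → Spec_strip_u_r_t argv (strip_u_r_t argv)

-- ===== LEMMAS AND PROOFS =====

-- proof-side recursive presentation of B's zip-filter pass
def pvFilterPairs : String → List String → List String
  | _, [] => []
  | prev, s :: rest =>
    if pvDrops prev s then pvFilterPairs s rest else s :: pvFilterPairs s rest

lemma alt_eq_filterPairs : ∀ (l : List String) (prev : String),
    (((prev :: l).zip l).filter (fun ps => !pvDrops ps.1 ps.2)).map Prod.snd
      = pvFilterPairs prev l := by
  intro l
  induction l with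
  | nil => intro prev; rfl
  | cons s rest ih =>
    intro prev
    rw [List.zip_cons_cons, List.filter_cons]
    by_cases h : pvDrops prev s = true
    · simp [h, pvFilterPairs, ih s]
    · simp [h, pvFilterPairs, ih s]

-- every key literal starts with '-'
lemma key_dash (s : String) (h : pvKeys.contains s = true) :
    PySem.Str.startswith s "-" = true := by
  simp only [pvKeys, List.contains_eq_mem, decide_eq_true_eq, List.mem_cons,
    List.not_mem_nil, or_false] at h
  rcases h with h | h | h | h | h | h <;> subst h <;> decide

-- no key literal contains '='
lemma key_no_eq (s : String) (h : pvKeys.contains s = true) :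
    PySem.Str.isIn "=" s = false := by
  simp only [pvKeys, List.contains_eq_mem, decide_eq_true_eq, List.mem_cons,
    List.not_mem_nil, or_false] at h
  rcases h with h | h | h | h | h | h <;> subst h <;> decide

-- A's three glued-prefix branches, disjoined, are B's single combined test
lemma glued_eq (s : String) :
    ((PySem.Str.startswith s "-u" && decide (2 < PySem.Str.len s) && (PySem.Str.pyGet? s 2 != some '-'))
      || (PySem.Str.startswith s "-r" && decide (2 < PySem.Str.len s) && (PySem.Str.pyGet? s 2 != some '-'))
      || (PySem.Str.startswith s "-t" && decide (2 < PySem.Str.len s) && (PySem.Str.pyGet? s 2 != some '-')))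
    = (decide (2 < PySem.Str.len s) && (PySem.Str.pyGet? s 2 != some '-')
        && (PySem.Str.startswith s "-u" || PySem.Str.startswith s "-r" || PySem.Str.startswith s "-t")) := by
  cases hu : PySem.Str.startswith s "-u" <;>
  cases hr : PySem.Str.startswith s "-r" <;>
  cases ht : PySem.Str.startswith s "-t" <;>
  cases hl : decide (2 < PySem.Str.len s) <;>
  cases hg : (PySem.Str.pyGet? s 2 != some '-') <;> simp_all

-- the element preceding position i ('' at the front)
def pvPrev (argv : List String) (i : Nat) : String :=
  if i = 0 then "" else argv.getD (i - 1) ""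

-- main invariant: A's loop from index i equals the pairwise filter of the suffix,
-- provided the predecessor is a key only when the current element starts with '-'
lemma loopA_eq (argv : List String) : ∀ (fuel i : Nat) (out : List String),
    argv.length - i ≤ fuel →
    (pvKeys.contains (pvPrev argv i) = true →
      argv.length ≤ i ∨ PySem.Str.startswith (argv.getD i "") "-" = true) →
    stripALoop argv fuel i out = out ++ pvFilterPairs (pvPrev argv i) (argv.drop i) := by
  intro fuel
  induction fuel with
  | zero =>
    intro i out hle _
    have hge : argv.length ≤ i := by omega
    rw [stripALoop, List.drop_eq_nil_of_le hge, pvFilterPairs, List.append_nil]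
  | succ fuel ih =>
    intro i out hle hprev
    by_cases h : i < argv.length
    · have hdrop : argv.drop i = argv[i] :: argv.drop (i + 1) := List.drop_eq_getElem_cons h
      rw [stripALoop, dif_pos h, hdrop]
      set s := argv[i] with hs
      have hgetDi : argv.getD i "" = s := List.getD_eq_getElem _ _ h
      have hprev1 : pvPrev argv (i + 1) = s := by
        unfold pvPrev
        rw [if_neg (Nat.succ_ne_zero i), Nat.add_sub_cancel]
        exact hgetDi
      -- clause 1 of pvDrops is false at every reached state
      have hc1 : (pvKeys.contains (pvPrev argv i) && !PySem.Str.startswith s "-") = false := by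
        by_cases hk : pvKeys.contains (pvPrev argv i) = true
        · rcases hprev hk with hlen | hsw
          · omega
          · rw [hgetDi] at hsw; rw [hk, hsw]; rfl
        · rw [Bool.not_eq_true] at hk; rw [hk]; rfl
      rw [pvFilterPairs]
      by_cases h1 : (PySem.Str.isIn "=" s
          && pvEqKeys.contains (((PySem.Str.splitMax? s "=" 1).getD []).headD "")) = true
      · -- '=' branch: dropped
        have h1' : (PySem.Str.isIn "=" s
            && pvKeys.contains (((PySem.Str.splitMax? s "=" 1).getD []).headD "")) = true := h1
        have hd : pvDrops (pvPrev argv i) s = true := by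
          unfold pvDrops; rw [hc1, Bool.false_or, h1', Bool.true_or, Bool.true_or]
        rw [if_pos h1, if_pos hd]
        have hrec := ih (i + 1) out (by omega) (by
          intro hk
          have hne := key_no_eq _ (hprev1 ▸ hk)
          rw [Bool.and_eq_true] at h1'
          rw [h1'.1] at hne; cases hne)
        rw [hprev1] at hrec
        exact hrec
      · rw [if_neg h1]
        by_cases h2 : pvTwoArg.contains s = true
        · -- bare key branch: dropped
          have h2' : pvKeys.contains s = true := h2
          have hd : pvDrops (pvPrev argv i) s = true := by
            unfold pvDrops; rw [hc1, Bool.false_or, h2', Bool.or_true, Bool.true_or]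
          rw [if_pos h2, if_pos hd]
          by_cases h3 : (decide (i + 1 < argv.length)
              && !(PySem.Str.startswith (argv.getD (i + 1) "") "-")) = true
          · -- skip 2: the value at i+1 is dropped by clause 1 on the B side
            rw [if_pos h3]
            rw [Bool.and_eq_true, decide_eq_true_eq] at h3
            obtain ⟨h3a, h3b⟩ := h3
            have hv : argv.getD (i + 1) "" = argv[i + 1] := List.getD_eq_getElem _ _ h3a
            have hdrop2 : argv.drop (i + 1) = argv[i + 1] :: argv.drop (i + 2) :=
              List.drop_eq_getElem_cons h3a
            rw [hdrop2, pvFilterPairs]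
            have hvnd : PySem.Str.startswith argv[i + 1] "-" = false := by
              rw [hv] at h3b; simpa using h3b
            have hdv : pvDrops s argv[i + 1] = true := by
              unfold pvDrops
              rw [h2', hvnd]
              simp only [Bool.not_false, Bool.and_self, Bool.true_or]
            rw [if_pos hdv]
            have hprev2 : pvPrev argv (i + 2) = argv[i + 1] := by
              unfold pvPrev
              rw [if_neg (by omega : ¬ i + 2 = 0), (by omega : i + 2 - 1 = i + 1)]
              exact hv
            have hrec := ih (i + 2) out (by omega) (by
              intro hk
              have hdsh := key_dash _ (hprev2 ▸ hk)
              rw [hvnd] at hdsh; cases hdsh)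
            rw [hprev2] at hrec
            exact hrec
          · rw [if_neg h3]
            have hrec := ih (i + 1) out (by omega) (by
              intro _
              rw [Bool.and_eq_true, not_and_or] at h3
              rcases h3 with h3 | h3
              · left; simp at h3; omega
              · right; simpa using h3)
            rw [hprev1] at hrec
            exact hrec
        · rw [if_neg h2]
          have h2' : pvKeys.contains s = false := (Bool.not_eq_true _).mp h2
          have hB := glued_eq s
          by_cases hglue : (decide (2 < PySem.Str.len s) && (PySem.Str.pyGet? s 2 != some '-')
              && (PySem.Str.startswith s "-u" || PySem.Str.startswith s "-r"
                  || PySem.Str.startswith s "-t")) = true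
          · -- glued form: dropped; A takes exactly one of its three branches
            have hd : pvDrops (pvPrev argv i) s = true := by
              unfold pvDrops; rw [hc1, Bool.false_or, hglue, Bool.or_true]
            have hrec : stripALoop argv fuel (i + 1) out
                = out ++ pvFilterPairs s (argv.drop (i + 1)) := by
              have hx := ih (i + 1) out (by omega) (by
                intro hk; rw [hprev1, h2'] at hk; cases hk)
              rw [hprev1] at hx
              exact hx
            have hA : ((PySem.Str.startswith s "-u" && decide (2 < PySem.Str.len s) && (PySem.Str.pyGet? s 2 != some '-'))
                || (PySem.Str.startswith s "-r" && decide (2 < PySem.Str.len s) && (PySem.Str.pyGet? s 2 != some '-'))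
                || (PySem.Str.startswith s "-t" && decide (2 < PySem.Str.len s) && (PySem.Str.pyGet? s 2 != some '-'))) = true := by
              rw [hB]; exact hglue
            rw [if_pos hd]
            by_cases hu : (PySem.Str.startswith s "-u" && decide (2 < PySem.Str.len s)
                && (PySem.Str.pyGet? s 2 != some '-')) = true
            · rw [if_pos hu]; exact hrec
            · rw [if_neg hu]
              by_cases hr : (PySem.Str.startswith s "-r" && decide (2 < PySem.Str.len s)
                  && (PySem.Str.pyGet? s 2 != some '-')) = true
              · rw [if_pos hr]; exact hrec
              · rw [if_neg hr]
                have ht : (PySem.Str.startswith s "-t" && decide (2 < PySem.Str.len s)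
                    && (PySem.Str.pyGet? s 2 != some '-')) = true := by
                  rcases Bool.or_eq_true_iff.mp hA with h' | ht
                  · rcases Bool.or_eq_true_iff.mp h' with hu' | hr'
                    · exact absurd hu' hu
                    · exact absurd hr' hr
                  · exact ht
                rw [if_pos ht]; exact hrec
          · -- kept: none of the branches fire
            have hglue' : (decide (2 < PySem.Str.len s) && (PySem.Str.pyGet? s 2 != some '-')
                && (PySem.Str.startswith s "-u" || PySem.Str.startswith s "-r"
                    || PySem.Str.startswith s "-t")) = false := (Bool.not_eq_true _).mp hglue
            have hu : ¬ ((PySem.Str.startswith s "-u" && decide (2 < PySem.Str.len s)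
                && (PySem.Str.pyGet? s 2 != some '-')) = true) := by
              intro hx; apply hglue; rw [← hB, hx]; simp
            have hr : ¬ ((PySem.Str.startswith s "-r" && decide (2 < PySem.Str.len s)
                && (PySem.Str.pyGet? s 2 != some '-')) = true) := by
              intro hx; apply hglue; rw [← hB, hx]; simp
            have ht : ¬ ((PySem.Str.startswith s "-t" && decide (2 < PySem.Str.len s)
                && (PySem.Str.pyGet? s 2 != some '-')) = true) := by
              intro hx; apply hglue; rw [← hB, hx]; simp
            have h1' : (PySem.Str.isIn "=" s
                && pvKeys.contains (((PySem.Str.splitMax? s "=" 1).getD []).headD "")) = false :=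
              (Bool.not_eq_true _).mp h1
            have hd : pvDrops (pvPrev argv i) s = false := by
              unfold pvDrops
              rw [hc1, h1', h2', hglue', Bool.false_or, Bool.false_or, Bool.false_or]
            rw [if_neg hu, if_neg hr, if_neg ht, if_neg (by simp [hd] : ¬ (pvDrops (pvPrev argv i) s = true))]
            have hrec : stripALoop argv fuel (i + 1) (out ++ [s])
                = (out ++ [s]) ++ pvFilterPairs s (argv.drop (i + 1)) := by
              have hx := ih (i + 1) (out ++ [s]) (by omega) (by
                intro hk; rw [hprev1, h2'] at hk; cases hk)
              rw [hprev1] at hx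
              exact hx
            rw [hrec, List.append_assoc, List.singleton_append]
    · rw [stripALoop, dif_neg h, List.drop_eq_nil_of_le (by omega), pvFilterPairs,
        List.append_nil]

-- ===== VERDICT (by name: the statement is the Claim_ definition above) =====
theorem strip_u_r_t_spec : Claim_equal_strip_u_r_t := by
  intro argv _
  unfold Spec_strip_u_r_t strip_u_r_t strip_u_r_t_alt
  rw [alt_eq_filterPairs argv ""]
  have h := loopA_eq argv argv.length 0 [] (by omega) (by intro hk; cases hk)
  simpa [pvPrev] using h
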